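-- pv_equiv track=rewrite | github.com/LuBieS2/Informatyka_Matura | 13czerwca2016r/2-3.py | nword
-- ===== SOURCE A (Python) =====
-- def nword(zbior):
--     niggest_number=0
--     for i in zbior:
--         if i%2==0:
--             if niggest_number%2==0 and niggest_number<i:
--                 niggest_number=i
--         elif i%2==1:
--             if niggest_number%2==0:
--                 niggest_number=i
--             elif niggest_number>i:
--                 niggest_number=i
--     return niggest_number
-- ===== SOURCE B (Python) =====
-- def nword(zbior):
--     odds = [i for i in zbior if i % 2 == 1]
--     if odds:
--         return min(odds)
--     evens = [i for i in zbior if i % 2 == 0]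
--     return max(evens + [0])
-- ===== Notes on version B (the rewrite author's own statement) =====
-- stated objective: simpler
-- what changed: Replaces A's single stateful parity-tracking loop with two filters plus min/max reductions: min of the odd elements if any, else max of the even elements and 0.
import Mathlib
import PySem

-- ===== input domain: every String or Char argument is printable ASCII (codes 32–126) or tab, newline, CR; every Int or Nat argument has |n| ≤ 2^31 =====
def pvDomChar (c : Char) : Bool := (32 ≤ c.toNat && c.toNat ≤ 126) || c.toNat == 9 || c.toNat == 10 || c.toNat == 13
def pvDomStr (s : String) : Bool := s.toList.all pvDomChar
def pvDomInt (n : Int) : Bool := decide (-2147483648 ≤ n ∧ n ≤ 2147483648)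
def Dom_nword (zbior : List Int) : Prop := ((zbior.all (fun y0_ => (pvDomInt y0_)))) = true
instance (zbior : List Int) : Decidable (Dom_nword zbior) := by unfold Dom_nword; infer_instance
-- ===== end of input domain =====

-- B replaces A's single stateful parity-tracking loop with two filters plus min/max
-- reductions (simpler decomposition; same O(n) cost).

-- ===== PORT A =====
def nwordStep (acc i : Int) : Int :=
  if PySem.Int.mod i 2 == 0 then
    (if PySem.Int.mod acc 2 == 0 && acc < i then i else acc)
  else if PySem.Int.mod i 2 == 1 then
    (if PySem.Int.mod acc 2 == 0 then i
     else if acc > i then i else acc)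
  else acc

def nword (zbior : List Int) : Int :=
  zbior.foldl nwordStep 0

-- ===== PORT B =====
def nword_alt (zbior : List Int) : Int :=
  let odds := zbior.filter (fun i => PySem.Int.mod i 2 == 1)
  match PySem.List.min? odds (fun x => x) with
  | some m => m
  | none =>
      let evens := zbior.filter (fun i => PySem.Int.mod i 2 == 0)
      ((PySem.List.max? (evens ++ [0]) (fun x => x)).getD 0)

-- ===== PRECONDITION & SPEC =====
def Spec_nword (zbior : List Int) (out : Int) : Prop := out = nword_alt zbior
instance (zbior : List Int) (out : Int) : Decidable (Spec_nword zbior out) := by unfold Spec_nword; infer_instance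

-- ===== CLAIM (what is proved, stated in full; the proofs are below) =====
def Claim_equal_nword : Prop := ∀ (zbior : List Int), Dom_nword zbior → Spec_nword zbior (nword zbior)

-- ===== LEMMAS AND PROOFS =====

theorem pymod_two (i : Int) : PySem.Int.mod i 2 = i % 2 :=
  PySem.Int.mod_eq_emod_of_pos (by norm_num)

theorem step_odd_odd {acc : Int} (i : Int) (h : acc % 2 = 1) (hi : i % 2 = 1) :
    nwordStep acc i = min acc i := by
  simp only [nwordStep, pymod_two, h, hi]
  norm_num
  omega

theorem step_odd_even {acc : Int} (i : Int) (h : acc % 2 = 1) (hi : i % 2 = 0) :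
    nwordStep acc i = acc := by
  simp only [nwordStep, pymod_two, h, hi]
  norm_num

theorem step_even_odd {acc : Int} (i : Int) (h : acc % 2 = 0) (hi : i % 2 = 1) :
    nwordStep acc i = i := by
  simp only [nwordStep, pymod_two, h, hi]
  norm_num

theorem step_even_even {acc : Int} (i : Int) (h : acc % 2 = 0) (hi : i % 2 = 0) :
    nwordStep acc i = max acc i := by
  simp only [nwordStep, pymod_two, h, hi]
  norm_num
  omega

-- A's loop with an odd accumulator: running min over the odd elements
theorem foldl_odd (l : List Int) : ∀ acc : Int, acc % 2 = 1 →
    l.foldl nwordStep acc =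
      (l.filter (fun i => PySem.Int.mod i 2 == 1)).foldl min acc := by
  induction l with
  | nil => intro acc _; rfl
  | cons i t ih =>
      intro acc h
      have hpar : i % 2 = 0 ∨ i % 2 = 1 := by omega
      rcases hpar with hi | hi
      · simp only [List.foldl_cons, List.filter_cons, pymod_two, hi,
          step_odd_even i h hi]
        norm_num
        simpa only [pymod_two] using ih acc h
      · simp only [List.foldl_cons, List.filter_cons, pymod_two, hi,
          step_odd_odd i h hi]
        norm_num
        simpa only [pymod_two] using ih (min acc i) (by omega)

-- A's loop with an even accumulator
theorem foldl_even (l : List Int) : ∀ acc : Int, acc % 2 = 0 →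
    l.foldl nwordStep acc =
      match l.filter (fun i => PySem.Int.mod i 2 == 1) with
      | [] => (l.filter (fun i => PySem.Int.mod i 2 == 0)).foldl max acc
      | o :: t => t.foldl min o := by
  induction l with
  | nil => intro acc _; rfl
  | cons i t ih =>
      intro acc h
      have hpar : i % 2 = 0 ∨ i % 2 = 1 := by omega
      rcases hpar with hi | hi
      · have hmax : (max acc i) % 2 = 0 := by
          rcases max_choice acc i with hc | hc <;> rw [hc] <;> omega
        simp only [List.foldl_cons, List.filter_cons, pymod_two, hi,
          step_even_even i h hi]
        norm_num
        simpa only [pymod_two] using ih (max acc i) hmax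
      · simp only [List.foldl_cons, List.filter_cons, pymod_two, hi,
          step_even_odd i h hi]
        norm_num
        simpa only [pymod_two] using foldl_odd t i hi

theorem foldl_max_out (t : List Int) : ∀ a b : Int,
    max (t.foldl max a) b = t.foldl max (max a b) := by
  induction t with
  | nil => intro a b; rfl
  | cons x s ih =>
      intro a b
      simp only [List.foldl_cons, ih, max_right_comm a x b]

-- ===== VERDICT (by name: the statement is the Claim_ definition above) =====
theorem nword_spec : Claim_equal_nword := by
  intro zbior _
  unfold Spec_nword nword nword_alt
  rw [foldl_even zbior 0 (by norm_num)]
  cases hodds : zbior.filter (fun i => PySem.Int.mod i 2 == 1) with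
  | cons o t =>
      simp [PySem.List.min?_id_cons]
  | nil =>
      simp only [PySem.List.min?]
      cases hevens : zbior.filter (fun i => PySem.Int.mod i 2 == 0) with
      | nil => simp [PySem.List.max?_id_cons]
      | cons e s =>
          simp only [List.cons_append, PySem.List.max?_id_cons, Option.getD_some]
          rw [List.foldl_append]
          simp only [List.foldl_cons, List.foldl_nil]
          rw [foldl_max_out s e 0, max_comm e 0]
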